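-- pv_equiv track=rewrite | github.com/daniel-reich/turbo-robot | CNpZrDFf3Ct7MzQrw_6.py | trouble
-- ===== SOURCE A (Python) =====
-- def trouble(num1, num2):
--   i = 0
--   while i < 10:
--     n1 = str(num1).count(str(i))
--     if n1 >= 3 and str(num2).count(str(i)) >= 2:
--         return True
--     else:
--       i += 1
--   return False
-- ===== SOURCE B (Python) =====
-- def trouble(num1, num2):
--     c1 = {}
--     for ch in str(num1):
--         c1[ch] = c1.get(ch, 0) + 1
--     c2 = {}
--     for ch in str(num2):
--         c2[ch] = c2.get(ch, 0) + 1
--     return any(n >= 3 and c2.get(d, 0) >= 2 for d, n in c1.items())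
-- ===== Notes on version B (the rewrite author's own statement) =====
-- stated objective: idiomatic
-- what changed: B builds one frequency dict per number in a single pass and scans the dict's entries, instead of A's while-loop over range(10) doing a repeated .count substring scan for each digit.
import Mathlib
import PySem

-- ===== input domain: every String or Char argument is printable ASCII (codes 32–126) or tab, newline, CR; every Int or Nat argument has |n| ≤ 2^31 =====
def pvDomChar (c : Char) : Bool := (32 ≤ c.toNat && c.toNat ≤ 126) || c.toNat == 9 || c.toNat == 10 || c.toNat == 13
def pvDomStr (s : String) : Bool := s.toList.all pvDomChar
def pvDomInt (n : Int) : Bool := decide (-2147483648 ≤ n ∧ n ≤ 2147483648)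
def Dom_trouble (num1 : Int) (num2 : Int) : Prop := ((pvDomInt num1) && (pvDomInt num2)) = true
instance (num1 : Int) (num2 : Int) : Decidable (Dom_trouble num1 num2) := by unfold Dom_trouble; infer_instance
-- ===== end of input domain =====

-- B replaces A's while-loop over the ten digits with its repeated .count scans by one frequency dict per number and a single scan of the dict's entries (idiomatic; same return value).

-- ===== PORT A =====
-- while i < 10: n1 = str(num1).count(str(i)); if n1 >= 3 and str(num2).count(str(i)) >= 2: return True; else: i += 1
def troubleGo (num1 : Int) (num2 : Int) (i : Int) : Bool :=
  if h : i < 10 then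
    let n1 := PySem.Str.count (PySem.Int.toStr num1) (PySem.Int.toStr i)
    if n1 ≥ 3 ∧ PySem.Str.count (PySem.Int.toStr num2) (PySem.Int.toStr i) ≥ 2 then
      true
    else
      troubleGo num1 num2 (i + 1)
  else
    false
termination_by (10 - i).toNat
decreasing_by omega

def trouble (num1 : Int) (num2 : Int) : Bool := troubleGo num1 num2 0

-- ===== PORT B =====
-- c1 = {}; for ch in str(num1): c1[ch] = c1.get(ch, 0) + 1   (same for c2)
-- return any(n >= 3 and c2.get(d, 0) >= 2 for d, n in c1.items())
def trouble_alt (num1 : Int) (num2 : Int) : Bool :=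
  let c1 := (PySem.Int.toStr num1).toList.foldl
      (fun (d : PySem.Dict Char Int) ch => d.insert ch (d.getD ch 0 + 1)) PySem.Dict.empty
  let c2 := (PySem.Int.toStr num2).toList.foldl
      (fun (d : PySem.Dict Char Int) ch => d.insert ch (d.getD ch 0 + 1)) PySem.Dict.empty
  c1.items.any (fun p => p.2 ≥ 3 && c2.getD p.1 0 ≥ 2)

-- ===== PRECONDITION & SPEC =====
def Spec_trouble (num1 : Int) (num2 : Int) (out : Bool) : Prop := out = trouble_alt num1 num2
instance (num1 : Int) (num2 : Int) (out : Bool) : Decidable (Spec_trouble num1 num2 out) := by unfold Spec_trouble; infer_instance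

-- ===== CLAIM (what is proved, stated in full; the proofs are below) =====
def Claim_equal_trouble : Prop := ∀ (num1 : Int) (num2 : Int), Dom_trouble num1 num2 → Spec_trouble num1 num2 (trouble num1 num2)

-- ===== LEMMAS AND PROOFS =====

-- PySem.Chars.count of a one-character needle is the character count.
theorem count_go_single (c : Char) : ∀ (fuel : Nat) (l : List Char) (acc : Nat), l.length ≤ fuel →
    PySem.Chars.count.go [c] fuel l acc = acc + l.count c := by
  intro fuel
  induction fuel with
  | zero => intro l acc h; simp at h; simp [h, PySem.Chars.count.go]
  | succ f ih =>
    intro l acc h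
    cases l with
    | nil => simp [PySem.Chars.count.go]
    | cons x t =>
      simp only [PySem.Chars.count.go]
      by_cases hx : x = c
      · subst hx
        simp [List.isPrefixOf, ih t (acc+1) (by simpa using h)]
        omega
      · simp [List.isPrefixOf, hx, Ne.symm hx, ih t acc (by simpa using h)]

theorem count_single (s : List Char) (c : Char) : PySem.Chars.count s [c] = s.count c := by
  simp [PySem.Chars.count, count_go_single c s.length s 0 le_rfl]

def pvDigits : List Char := ['0','1','2','3','4','5','6','7','8','9']

theorem mem_toDigitsCore : ∀ (fuel n : Nat) (acc : List Char) (c : Char),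
    c ∈ Nat.toDigitsCore 10 fuel n acc → c ∈ acc ∨ c ∈ pvDigits := by
  intro fuel
  induction fuel with
  | zero => intro n acc c h; simp [Nat.toDigitsCore] at h; exact Or.inl h
  | succ f ih =>
    intro n acc c h
    have hd : Nat.digitChar (n % 10) ∈ pvDigits := by
      have h10 : n % 10 < 10 := Nat.mod_lt _ (by norm_num)
      interval_cases (n % 10) <;> decide
    simp only [Nat.toDigitsCore] at h
    by_cases hc : n / 10 = 0
    · simp only [hc, if_true] at h
      rcases List.mem_cons.mp h with h | h
      · exact Or.inr (h ▸ hd)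
      · exact Or.inl h
    · simp only [if_neg hc] at h
      rcases ih _ _ _ h with h' | h'
      · rcases List.mem_cons.mp h' with h' | h'
        · exact Or.inr (h' ▸ hd)
        · exact Or.inl h'
      · exact Or.inr h'

-- str(n) consists of the sign and decimal digits only.
theorem mem_toChars (n : Int) (c : Char) (h : c ∈ PySem.Int.toChars n) : c = '-' ∨ c ∈ pvDigits := by
  unfold PySem.Int.toChars at h
  by_cases hn : n < 0
  · simp only [if_pos hn] at h
    rcases List.mem_cons.mp h with h | h
    · exact Or.inl h
    · rcases mem_toDigitsCore _ _ _ _ h with h' | h'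
      · simp at h'
      · exact Or.inr h'
  · simp only [if_neg hn] at h
    rcases mem_toDigitsCore _ _ _ _ h with h' | h'
    · simp at h'
    · exact Or.inr h'

-- '-' occurs at most once in str(n), so it can never reach a count of 3.
theorem count_dash_toChars (n : Int) : (PySem.Int.toChars n).count '-' ≤ 1 := by
  have hnot : ∀ m : Nat, '-' ∉ Nat.toDigits 10 m := by
    intro m hm
    rcases mem_toDigitsCore _ _ _ _ hm with h | h
    · simp at h
    · simp [pvDigits] at h
  unfold PySem.Int.toChars
  by_cases hn : n < 0
  · simp [if_pos hn, List.count_eq_zero_of_not_mem (hnot _)]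
  · simp [if_neg hn, List.count_eq_zero_of_not_mem (hnot _)]

-- the per-digit test both programs evaluate
def pvChk (num1 num2 : Int) (c : Char) : Bool :=
  decide ((PySem.Int.toStr num1).toList.count c ≥ 3) && decide ((PySem.Int.toStr num2).toList.count c ≥ 2)

theorem go_step (num1 num2 i : Int) (c : Char) (hi : i < 10)
    (hc : (PySem.Int.toStr i).toList = [c]) :
    troubleGo num1 num2 i = (pvChk num1 num2 c || troubleGo num1 num2 (i+1)) := by
  rw [troubleGo]
  simp only [dif_pos hi, PySem.Str.count_eq, hc, count_single, pvChk]
  by_cases h3 : (PySem.Int.toStr num1).toList.count c ≥ 3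
  · by_cases h2 : (PySem.Int.toStr num2).toList.count c ≥ 2
    · simp
    · simp
  · simp

theorem trouble_eq_any (num1 num2 : Int) :
    trouble num1 num2 = pvDigits.any (pvChk num1 num2) := by
  have e10 : troubleGo num1 num2 10 = false := by rw [troubleGo]; simp
  unfold trouble
  rw [go_step num1 num2 0 '0' (by norm_num) rfl]
  norm_num only
  rw [go_step num1 num2 1 '1' (by norm_num) rfl]
  norm_num only
  rw [go_step num1 num2 2 '2' (by norm_num) rfl]
  norm_num only
  rw [go_step num1 num2 3 '3' (by norm_num) rfl]
  norm_num only
  rw [go_step num1 num2 4 '4' (by norm_num) rfl]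
  norm_num only
  rw [go_step num1 num2 5 '5' (by norm_num) rfl]
  norm_num only
  rw [go_step num1 num2 6 '6' (by norm_num) rfl]
  norm_num only
  rw [go_step num1 num2 7 '7' (by norm_num) rfl]
  norm_num only
  rw [go_step num1 num2 8 '8' (by norm_num) rfl]
  norm_num only
  rw [go_step num1 num2 9 '9' (by norm_num) rfl]
  norm_num only
  norm_num [e10, pvDigits, List.any_cons]

theorem alt_eq_any (num1 num2 : Int) :
    trouble_alt num1 num2 = (PySem.Set.ofList (PySem.Int.toStr num1).toList).any (pvChk num1 num2) := by
  simp only [trouble_alt, PySem.Dict.foldl_insert_getD_add_one_eq_counter]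
  rw [PySem.Dict.items_counter, List.any_map]
  refine List.any_congr rfl fun c => ?_
  simp only [Function.comp, PySem.Dict.getD_counter, pvChk]
  congr 1 <;> rw [decide_eq_decide] <;> constructor <;> intro h <;> omega

theorem trouble_eq_alt (num1 num2 : Int) : trouble num1 num2 = trouble_alt num1 num2 := by
  rw [trouble_eq_any, alt_eq_any]
  rcases Bool.eq_false_or_eq_true (pvDigits.any (pvChk num1 num2)) with hA | hA
  all_goals rw [hA]
  · symm
    rw [List.any_eq_true] at hA ⊢
    rcases hA with ⟨c, hc, hP⟩
    have hP' := hP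
    simp only [pvChk, Bool.and_eq_true, decide_eq_true_eq] at hP'
    refine ⟨c, ?_, hP⟩
    rw [PySem.Set.mem_ofList, ← List.count_pos_iff]
    omega
  · symm
    rw [List.any_eq_false] at hA ⊢
    intro c hc
    by_cases h3 : (PySem.Int.toStr num1).toList.count c ≥ 3
    · rw [PySem.Set.mem_ofList] at hc
      have := mem_toChars num1 c (by rwa [PySem.Int.toList_toStr] at hc)
      rcases this with h | h
      · subst h
        have := count_dash_toChars num1
        rw [PySem.Int.toList_toStr] at h3
        omega
      · exact hA c h
    · simp only [pvChk, Bool.and_eq_true, decide_eq_true_eq, not_and]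
      intro hcon
      omega

-- ===== VERDICT (by name: the statement is the Claim_ definition above) =====
theorem trouble_spec : Claim_equal_trouble := by
  intro num1 num2 _
  exact trouble_eq_alt num1 num2
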